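-- pv_equiv track=rewrite | github.com/amalhotra08/wellness-gpt | src/services/citations.py | host_to_source
-- ===== SOURCE A (Python) =====
-- FRIENDLY_NAMES = {
--     "ncbi.nlm.nih.gov": "NIH / PubMed",
--     "medlineplus.gov": "MedlinePlus",
--     "nih.gov": "NIH",
--     "cdc.gov": "CDC",
--     "who.int": "WHO",
--     "fda.gov": "FDA",
--     "ema.europa.eu": "EMA",
--     "nejm.org": "The New England Journal of Medicine",
--     "thelancet.com": "The Lancet",
--     "bmj.com": "BMJ",
--     "jamanetwork.com": "JAMA Network",
--     "nature.com": "Nature",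
--     "sciencedirect.com": "ScienceDirect",
--     "cochranelibrary.com": "Cochrane Library",
--     "mayoclinic.org": "Mayo Clinic",
--     "cancer.org": "American Cancer Society",
--     "aad.org": "American Academy of Dermatology",
--     "clevelandclinic.org": "Cleveland Clinic",
--     "nhs.uk": "NHS",
-- }
--
-- def host_to_source(host: str) -> str:
--     host = (host or "").lower()
--     # Exact host match first
--     if host in FRIENDLY_NAMES:
--         return FRIENDLY_NAMES[host]
--     # Then by suffix (e.g., subdomain.aad.org -> AAD)
--     for dom, name in FRIENDLY_NAMES.items():
--         if host == dom or host.endswith("." + dom):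
--             return name
--     # Fallback: show bare host
--     return host
-- ===== SOURCE B (Python) =====
-- FRIENDLY_NAMES = {
--     "ncbi.nlm.nih.gov": "NIH / PubMed",
--     "medlineplus.gov": "MedlinePlus",
--     "nih.gov": "NIH",
--     "cdc.gov": "CDC",
--     "who.int": "WHO",
--     "fda.gov": "FDA",
--     "ema.europa.eu": "EMA",
--     "nejm.org": "The New England Journal of Medicine",
--     "thelancet.com": "The Lancet",
--     "bmj.com": "BMJ",
--     "jamanetwork.com": "JAMA Network",
--     "nature.com": "Nature",
--     "sciencedirect.com": "ScienceDirect",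
--     "cochranelibrary.com": "Cochrane Library",
--     "mayoclinic.org": "Mayo Clinic",
--     "cancer.org": "American Cancer Society",
--     "aad.org": "American Academy of Dermatology",
--     "clevelandclinic.org": "Cleveland Clinic",
--     "nhs.uk": "NHS",
-- }
--
-- def host_to_source(host: str) -> str:
--     host = (host or "").lower()
--     parts = host.split(".")
--     for i in range(len(parts)):
--         candidate = ".".join(parts[i:])
--         if candidate in FRIENDLY_NAMES:
--             return FRIENDLY_NAMES[candidate]
--     return host
-- ===== Notes on version B (the rewrite author's own statement) =====
-- stated objective: alternative
-- what changed: Instead of scanning all 19 dict entries and testing whether the host ends with each key, B splits the host at the dots and walks its progressively shorter dot-suffixes doing one dict lookup per suffix; this agrees with A's first-match-in-dict-order because the only nested key pair lists the more specific key first.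
import Mathlib
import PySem

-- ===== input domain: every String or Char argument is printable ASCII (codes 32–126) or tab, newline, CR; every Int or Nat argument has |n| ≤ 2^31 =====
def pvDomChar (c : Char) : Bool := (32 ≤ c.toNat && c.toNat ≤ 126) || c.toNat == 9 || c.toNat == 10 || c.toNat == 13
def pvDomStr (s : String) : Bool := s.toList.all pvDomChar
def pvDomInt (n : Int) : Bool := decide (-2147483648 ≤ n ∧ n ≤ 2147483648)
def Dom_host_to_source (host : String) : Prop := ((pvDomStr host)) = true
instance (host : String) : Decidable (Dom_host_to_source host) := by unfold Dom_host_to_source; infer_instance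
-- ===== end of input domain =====

-- B replaces A's scan of every dict entry (a suffix test per entry) by a walk over the
-- host's own dot-separated suffixes with one dict lookup each (objective: alternative algorithm).

-- ===== PORT A =====
def pvItems : List (String × String) :=
  [("ncbi.nlm.nih.gov", "NIH / PubMed"),
   ("medlineplus.gov", "MedlinePlus"),
   ("nih.gov", "NIH"),
   ("cdc.gov", "CDC"),
   ("who.int", "WHO"),
   ("fda.gov", "FDA"),
   ("ema.europa.eu", "EMA"),
   ("nejm.org", "The New England Journal of Medicine"),
   ("thelancet.com", "The Lancet"),
   ("bmj.com", "BMJ"),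
   ("jamanetwork.com", "JAMA Network"),
   ("nature.com", "Nature"),
   ("sciencedirect.com", "ScienceDirect"),
   ("cochranelibrary.com", "Cochrane Library"),
   ("mayoclinic.org", "Mayo Clinic"),
   ("cancer.org", "American Cancer Society"),
   ("aad.org", "American Academy of Dermatology"),
   ("clevelandclinic.org", "Cleveland Clinic"),
   ("nhs.uk", "NHS")]

-- FRIENDLY_NAMES: a dict literal with distinct keys, as an insertion-order Dict
def pvFriendly : PySem.Dict String String := ⟨pvItems⟩

-- the 'for dom, name in FRIENDLY_NAMES.items(): if …: return name' loop
def pvALoop (hl : String) : List (String × String) → Option String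
  | [] => none
  | (dom, name) :: rest =>
    if hl == dom || PySem.Str.endswith hl ("." ++ dom) then some name else pvALoop hl rest

def host_to_source (host : String) : String :=
  let hl := PySem.Str.lower (if host == "" then "" else host)  -- (host or "").lower()
  match pvFriendly.get? hl with                                -- if host in FRIENDLY_NAMES
  | some v => v
  | none => (pvALoop hl pvFriendly.items).getD hl

-- ===== PORT B =====
-- the 'for i in range(len(parts)): candidate = ".".join(parts[i:]); if candidate in …' loop
def pvBLoop (parts : List String) : List Int → Option String
  | [] => none
  | i :: rest =>
    match pvFriendly.get? (PySem.Str.join "." (PySem.List.slice parts (some i) none)) with  -- candidate = ".".join(parts[i:])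
    | some v => some v
    | none => pvBLoop parts rest

def host_to_source_alt (host : String) : String :=
  let hl := PySem.Str.lower (if host == "" then "" else host)   -- (host or "").lower()
  let parts := (PySem.Str.split? hl ".").getD []                -- host.split("."); sep "." ≠ "" so split? is always `some`
  (pvBLoop parts (PySem.List.pyRange 0 (parts.length : Int) 1)).getD hl

-- ===== PRECONDITION & SPEC =====
def Spec_host_to_source (host : String) (out : String) : Prop := out = host_to_source_alt host
instance (host : String) (out : String) : Decidable (Spec_host_to_source host out) := by unfold Spec_host_to_source; infer_instance

-- ===== CLAIM (what is proved, stated in full; the proofs are below) =====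
def Claim_equal_host_to_source : Prop := ∀ (host : String), Dom_host_to_source host → Spec_host_to_source host (host_to_source host)

-- ===== LEMMAS AND PROOFS =====

-- proof-side view of the items with keys as character lists
def pvItemsC : List (List Char × String) := pvItems.map (fun kv => (kv.1.toList, kv.2))

-- generic first-match scan over an association list (char-list keys)
def pvFirstC (p : List Char → Bool) : List (List Char × String) → Option String
  | [] => none
  | kv :: t => if p kv.1 then some kv.2 else pvFirstC p t

-- the dot-separated suffixes of a split host, longest first
def pvCands : List (List Char) → List (List Char)
  | [] => []
  | p :: ps => ['.'].intercalate (p :: ps) :: pvCands ps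

-- ---- PySem.Chars.splitOn ↔ List.splitOnP ----
theorem pv_modifyHead_id {α : Type} (l : List α) : List.modifyHead (fun x => x) l = l := by
  cases l <;> rfl

theorem pv_go_eq (c : Char) : ∀ (fuel : ℕ) (l cur : List Char) (acc : List (List Char)),
    l.length ≤ fuel →
    PySem.Chars.splitOn.go [c] fuel l cur acc
      = acc.reverse ++ (List.splitOnP (· == c) l).modifyHead (cur.reverse ++ ·) := by
  intro fuel
  induction fuel with
  | zero =>
    intro l cur acc h
    have hl : l = [] := List.eq_nil_of_length_eq_zero (Nat.le_zero.mp h)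
    subst hl
    simp [PySem.Chars.splitOn.go, List.splitOnP_nil]
  | succ f ih =>
    intro l cur acc h
    cases l with
    | nil => simp [PySem.Chars.splitOn.go, List.splitOnP_nil]
    | cons a rest =>
      rw [PySem.Chars.splitOn.go]
      by_cases hca : c = a
      · subst hca
        have hpre : [c].isPrefixOf (c :: rest) = true := by simp [List.isPrefixOf]
        rw [if_pos hpre]
        have hr : rest.length ≤ f := by simpa using h
        rw [ih _ [] (cur.reverse :: acc) (by simpa using hr)]
        simp [List.splitOnP_cons, pv_modifyHead_id]
      · have hpre : ¬ ([c].isPrefixOf (a :: rest) = true) := by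
          simp [List.isPrefixOf, beq_iff_eq]
          intro hc; exact hca hc
        rw [if_neg hpre]
        have hr : rest.length ≤ f := by simpa using h
        rw [ih rest (a :: cur) acc hr]
        rw [List.splitOnP_cons]
        rw [if_neg (by simp [beq_iff_eq]; intro hc; exact hca hc.symm)]
        rw [List.modifyHead_modifyHead]
        have hfn : (fun x => (a :: cur).reverse ++ x) = ((fun x => cur.reverse ++ x) ∘ List.cons a) := by
          funext x; simp
        rw [hfn]

theorem pv_splitOn_eq (c : Char) (s : List Char) :
    PySem.Chars.splitOn s [c] = List.splitOnP (· == c) s := by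
  unfold PySem.Chars.splitOn
  rw [pv_go_eq c (s.length + 1) s [] [] (by omega)]
  simp [pv_modifyHead_id]


-- ---- facts about splitOnP / intercalate ----
theorem pv_inter_cons (p q : List Char) (qs : List (List Char)) :
    ['.'].intercalate (p :: q :: qs) = p ++ '.' :: ['.'].intercalate (q :: qs) := by
  simp [List.intercalate, List.intersperse]

theorem pv_dotfree (c : Char) : ∀ (s : List Char), ∀ p ∈ List.splitOnP (· == c) s, c ∉ p := by
  intro s
  induction s with
  | nil => simp [List.splitOnP_nil]
  | cons a t ih =>
    intro p hp
    rw [List.splitOnP_cons] at hp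
    by_cases hac : (a == c) = true
    · rw [if_pos hac] at hp
      rcases List.mem_cons.mp hp with rfl | hp
      · simp
      · exact ih p hp
    · rw [if_neg hac] at hp
      obtain ⟨q, qs, hq⟩ := List.exists_cons_of_ne_nil (List.splitOnP_ne_nil (· == c) t)
      rw [hq] at hp
      simp only [List.modifyHead] at hp
      rcases List.mem_cons.mp hp with rfl | hp
      · intro hm
        rcases List.mem_cons.mp hm with rfl | hm
        · simp at hac
        · exact ih q (hq ▸ List.mem_cons_self) hm
      · exact ih p (hq ▸ List.mem_cons_of_mem q hp)

theorem pv_recon (s : List Char) : ['.'].intercalate (List.splitOnP (· == '.') s) = s :=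
  List.intercalate_splitOn s '.'

theorem pv_suffix_clean : ∀ (p : List Char), '.' ∉ p → ∀ (t k h' : List Char),
    t ++ '.' :: k = p ++ '.' :: h' → ('.' :: k) <:+ ('.' :: h') := by
  intro p
  induction p with
  | nil => intro _ t k h' ht; exact ⟨t, by simpa using ht⟩
  | cons a p' ih =>
    intro hp t k h' ht
    cases t with
    | nil =>
      exfalso
      have : ('.' : Char) = a := by simpa using congrArg (fun l => l.head?) ht
      exact hp (this ▸ List.mem_cons_self)
    | cons b t' =>
      have hb : b = a ∧ t' ++ '.' :: k = p' ++ '.' :: h' := by simpa using ht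
      exact ih (fun hm => hp (List.mem_cons_of_mem _ hm)) t' k h' hb.2

-- ---- the candidate (dot-suffix) list ----
theorem pv_cands_rel : ∀ (parts : List (List Char)), ∀ b ∈ pvCands parts,
    b = ['.'].intercalate parts ∨ ('.' :: b) <:+ ['.'].intercalate parts := by
  intro parts
  induction parts with
  | nil => simp [pvCands]
  | cons p ps ih =>
    intro b hb
    simp only [pvCands, List.mem_cons] at hb
    rcases hb with rfl | hb
    · left; rfl
    · cases ps with
      | nil => simp [pvCands] at hb
      | cons q qs =>
        right
        rw [pv_inter_cons]
        rcases ih b hb with rfl | hs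
        · exact ⟨p, rfl⟩
        · exact hs.trans ⟨p ++ ['.'], by simp⟩

theorem pv_cands_lift (p q : List Char) (qs : List (List Char)) (b : List Char)
    (hb : b ∈ pvCands (q :: qs)) : ('.' :: b) <:+ ['.'].intercalate (p :: q :: qs) := by
  rw [pv_inter_cons]
  rcases pv_cands_rel (q :: qs) b hb with rfl | hs
  · exact ⟨p, rfl⟩
  · exact hs.trans ⟨p ++ ['.'], by simp⟩

theorem pv_cands_pairwise : ∀ (parts : List (List Char)),
    (pvCands parts).Pairwise (fun a b => ('.' :: b) <:+ a) := by
  intro parts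
  induction parts with
  | nil => simp [pvCands]
  | cons p ps ih =>
    simp only [pvCands]
    refine List.Pairwise.cons ?_ ih
    intro b hb
    cases ps with
    | nil => simp [pvCands] at hb
    | cons q qs => exact pv_cands_lift p q qs b hb

theorem pv_matches_iff : ∀ (parts : List (List Char)), parts ≠ [] →
    (∀ p ∈ parts, ('.' : Char) ∉ p) → ∀ k : List Char,
    (['.'].intercalate parts = k ∨ ('.' :: k) <:+ ['.'].intercalate parts) ↔ k ∈ pvCands parts := by
  intro parts
  induction parts with
  | nil => intro h; exact absurd rfl h
  | cons p ps ih =>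
    intro _ hdf k
    cases ps with
    | nil =>
      constructor
      · rintro (rfl | hsuf)
        · simp [pvCands]
        · exfalso
          have hmem : ('.' : Char) ∈ p := by
            have : ('.' : Char) ∈ ('.' :: k) := List.mem_cons_self
            have hsub := hsuf.subset this
            simpa [List.intercalate] using hsub
          exact hdf p List.mem_cons_self hmem
      · intro hk
        left
        have : k = p := by simpa [pvCands, List.intercalate] using hk
        simp [this, List.intercalate]
    | cons q qs =>
      have hne : (q :: qs : List (List Char)) ≠ [] := by simp
      have hdf' : ∀ x ∈ q :: qs, ('.' : Char) ∉ x := fun x hx => hdf x (List.mem_cons_of_mem _ hx)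
      have IH := ih hne hdf' k
      constructor
      · rintro (rfl | hsuf)
        · exact List.mem_cons_self
        · rw [pv_inter_cons] at hsuf
          obtain ⟨t, ht⟩ := hsuf
          have hcs := pv_suffix_clean p (hdf p List.mem_cons_self) t k _ ht
          rcases List.suffix_cons_iff.mp hcs with heq | hsuf'
          · have hk : ['.'].intercalate (q :: qs) = k := by
              have := heq  -- '.'::k = '.'::intercalate (q::qs)
              simpa using this.symm
            exact List.mem_cons_of_mem _ (IH.mp (Or.inl hk))
          · exact List.mem_cons_of_mem _ (IH.mp (Or.inr hsuf'))
      · intro hk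
        rcases List.mem_cons.mp hk with rfl | hk
        · exact Or.inl rfl
        · exact Or.inr (pv_cands_lift p q qs k hk)

theorem pv_cands_eq_map : ∀ (parts : List (List Char)),
    pvCands parts = (List.range parts.length).map (fun j => ['.'].intercalate (parts.drop j)) := by
  intro parts
  induction parts with
  | nil => simp [pvCands]
  | cons p ps ih =>
    show ['.'].intercalate (p :: ps) :: pvCands ps
        = (List.range (ps.length + 1)).map (fun j => ['.'].intercalate ((p :: ps).drop j))
    rw [List.range_succ_eq_map, List.map_cons, List.map_map, ih]
    refine congrArg₂ _ rfl ?_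
    apply List.map_congr_left
    intro j _
    simp

-- ---- first-match scans ----
theorem pvFirstC_congr : ∀ (items : List (List Char × String)) (p q : List Char → Bool),
    (∀ kv ∈ items, p kv.1 = q kv.1) → pvFirstC p items = pvFirstC q items := by
  intro items p q h
  induction items with
  | nil => rfl
  | cons kv t ih =>
    simp only [pvFirstC]
    rw [h kv List.mem_cons_self, ih (fun x hx => h x (List.mem_cons_of_mem _ hx))]

theorem pvFirstC_none_pred : ∀ (items : List (List Char × String)) (p : List Char → Bool),
    (∀ kv ∈ items, p kv.1 = false) → pvFirstC p items = none := by
  intro items p h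
  induction items with
  | nil => rfl
  | cons kv t ih =>
    simp only [pvFirstC]
    rw [h kv List.mem_cons_self]
    exact ih (fun x hx => h x (List.mem_cons_of_mem _ hx))

theorem pvFirstC_beq_any : ∀ (items : List (List Char × String)) (c : List Char) (v : String),
    pvFirstC (fun k => k == c) items = some v → items.any (fun kv => kv.1 == c) = true := by
  intro items c v
  induction items with
  | nil => intro h; exact absurd h (by simp [pvFirstC])
  | cons kv t ih =>
    intro h
    simp only [pvFirstC] at h
    by_cases hk : (kv.1 == c) = true
    · simp [hk]
    · rw [if_neg hk] at h
      simp [ih h]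

theorem pvFirstC_any_beq : ∀ (items : List (List Char × String)) (c : List Char),
    items.any (fun kv => kv.1 == c) = true → ∃ v, pvFirstC (fun k => k == c) items = some v := by
  intro items c
  induction items with
  | nil => intro h; simp at h
  | cons kv t ih =>
    intro h
    by_cases hk : (kv.1 == c) = true
    · exact ⟨kv.2, by simp [pvFirstC, hk]⟩
    · have : t.any (fun kv => kv.1 == c) = true := by
        rcases List.any_eq_true.mp h with ⟨x, hx, hpx⟩
        rcases List.mem_cons.mp hx with rfl | hx
        · exact absurd hpx hk
        · exact List.any_eq_true.mpr ⟨x, hx, hpx⟩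
      obtain ⟨v, hv⟩ := ih this
      exact ⟨v, by simp [pvFirstC, hk, hv]⟩

-- ---- the central agreement lemma: A's dict-order scan = B's longest-suffix search ----
theorem pvG_found : ∀ (c : List Char) (cs : List (List Char)) (items : List (List Char × String)),
    items.Pairwise (fun a b => a.1 ≠ b.1 ∧ ¬(('.' :: a.1) <:+ b.1)) →
    (∃ kv ∈ items, kv.1 = c) →
    (∀ x ∈ cs, ('.' :: x) <:+ c) →
    pvFirstC (fun k => decide (k ∈ c :: cs)) items = pvFirstC (fun k => k == c) items := by
  intro c cs items
  induction items with
  | nil => intros; rfl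
  | cons kv t ih =>
    intro hF hc hx
    obtain ⟨hd, hF'⟩ := List.pairwise_cons.mp hF
    by_cases hk : kv.1 = c
    · simp [pvFirstC, hk]
    · have hnm : kv.1 ∉ c :: cs := by
        intro hm
        rcases List.mem_cons.mp hm with heq | hm
        · exact hk heq
        · obtain ⟨b, hbmem, hbc⟩ := hc
          rcases List.mem_cons.mp hbmem with rfl | hbmem
          · exact hk hbc
          · exact (hd b hbmem).2 (hbc ▸ hx kv.1 hm)
      have hc' : ∃ kv' ∈ t, kv'.1 = c := by
        obtain ⟨b, hbmem, hbc⟩ := hc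
        rcases List.mem_cons.mp hbmem with rfl | hbmem
        · exact absurd hbc hk
        · exact ⟨b, hbmem, hbc⟩
      simp only [pvFirstC]
      rw [if_neg (by simpa using hnm), if_neg (by simpa using hk)]
      exact ih hF' hc' hx

theorem pvG : ∀ (cands : List (List Char)) (items : List (List Char × String)),
    items.Pairwise (fun a b => a.1 ≠ b.1 ∧ ¬(('.' :: a.1) <:+ b.1)) →
    cands.Pairwise (fun a b => ('.' :: b) <:+ a) →
    pvFirstC (fun k => decide (k ∈ cands)) items
      = (match cands.find? (fun c => items.any (fun kv => kv.1 == c)) with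
         | none => none
         | some c => pvFirstC (fun k => k == c) items) := by
  intro cands
  induction cands with
  | nil =>
    intro items _ _
    simp only [List.find?]
    exact pvFirstC_none_pred items _ (by simp)
  | cons c cs ih =>
    intro items hF hc
    obtain ⟨hx, hc'⟩ := List.pairwise_cons.mp hc
    by_cases hm : items.any (fun kv => kv.1 == c) = true
    · rw [List.find?_cons_of_pos (p := fun c => items.any fun kv => kv.1 == c) hm]
      refine pvG_found c cs items hF ?_ hx
      obtain ⟨kv, hkv, hbeq⟩ := List.any_eq_true.mp hm
      exact ⟨kv, hkv, by simpa using hbeq⟩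
    · rw [List.find?_cons_of_neg (p := fun c => items.any fun kv => kv.1 == c) hm]
      rw [pvFirstC_congr items _ (fun k => decide (k ∈ cs)) ?_]
      · exact ih items hF hc'
      · intro kv hkv
        have hne : kv.1 ≠ c := fun he => hm (List.any_eq_true.mpr ⟨kv, hkv, by simp [he]⟩)
        simp [List.mem_cons, hne]

-- ---- bridges from the ports to the char-level scans ----
theorem pvALoop_eq (hl : String) : ∀ (l : List (String × String)),
    pvALoop hl l
      = pvFirstC (fun k => decide (hl.toList = k ∨ ('.' :: k) <:+ hl.toList))
          (l.map fun kv => (kv.1.toList, kv.2)) := by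
  intro l
  induction l with
  | nil => rfl
  | cons kv t ih =>
    obtain ⟨dom, name⟩ := kv
    have hdot : (("." : String) ++ dom).toList = '.' :: dom.toList := by
      rw [String.toList_append]; rfl
    have hpred : (hl == dom || PySem.Str.endswith hl ("." ++ dom))
        = decide (hl.toList = dom.toList ∨ ('.' :: dom.toList) <:+ hl.toList) := by
      rw [Bool.eq_iff_iff]
      simp only [PySem.Str.endswith_eq, PySem.Chars.endswith, hdot, Bool.or_eq_true,
        decide_eq_true_eq, beq_iff_eq, List.isSuffixOf_iff_suffix, ← String.toList_inj]
    simp only [pvALoop, List.map_cons, pvFirstC]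
    rw [hpred, ih]

theorem pvGet?_eq : ∀ (l : List (String × String)) (s : String),
    Option.map (fun x => x.2) (List.find? (fun p => p.1 == s) l)
      = pvFirstC (fun k => k == s.toList) (l.map fun kv => (kv.1.toList, kv.2)) := by
  intro l s
  induction l with
  | nil => rfl
  | cons kv t ih =>
    by_cases h : kv.1 = s
    · subst h
      rw [List.find?_cons_of_pos (by simp)]
      simp [pvFirstC]
    · rw [List.find?_cons_of_neg (by simp [h])]
      have hf : (kv.1.toList == s.toList) = false := by
        simp [String.toList_inj]; exact h
      simp only [List.map_cons, pvFirstC]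
      rw [if_neg (by simp [hf])]
      exact ih

theorem pv_get?_eq_items (s : String) :
    pvFriendly.get? s = pvFirstC (fun k => k == s.toList) pvItemsC := by
  simpa [PySem.Dict.get?, pvFriendly, pvItemsC] using pvGet?_eq pvItems s

theorem pv_pyRange_nat (n : ℕ) :
    PySem.List.pyRange 0 (n : Int) 1 = (List.range n).map (Nat.cast : ℕ → ℤ) := by
  rw [PySem.List.pyRange_one 0 n]
  simp only [Int.sub_zero, Int.toNat_natCast, zero_add]

theorem pvBLoop_eq : ∀ (js : List ℕ) (parts : List String),
    pvBLoop parts (js.map (Nat.cast : ℕ → ℤ))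
      = (match (js.map (fun j => ['.'].intercalate ((parts.map String.toList).drop j))).find?
            (fun c => pvItemsC.any (fun kv => kv.1 == c)) with
         | none => none
         | some c => pvFirstC (fun k => k == c) pvItemsC) := by
  intro js
  induction js with
  | nil => intro parts; rfl
  | cons j t ih =>
    intro parts
    have hcand : (PySem.Str.join "." (PySem.List.slice parts (some ((j : ℕ) : Int)) none)).toList
        = ['.'].intercalate ((parts.map String.toList).drop j) := by
      rw [PySem.List.slice_from parts (Int.natCast_nonneg j)]
      rw [PySem.Str.toList_join]
      simp [PySem.Chars.join, List.map_drop]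
    simp only [List.map_cons]
    rw [show pvBLoop parts ((Nat.cast j : ℤ) :: (t.map (Nat.cast : ℕ → ℤ)))
          = (match pvFriendly.get? (PySem.Str.join "." (PySem.List.slice parts (some (Nat.cast j : ℤ)) none)) with
             | some v => some v
             | none => pvBLoop parts (t.map (Nat.cast : ℕ → ℤ))) from rfl]
    rw [pv_get?_eq_items, hcand]
    by_cases hg : ∃ v, pvFirstC (fun k => k == ['.'].intercalate ((parts.map String.toList).drop j)) pvItemsC = some v
    · obtain ⟨v, hv⟩ := hg
      have hany := pvFirstC_beq_any _ _ _ hv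
      rw [List.find?_cons_of_pos (p := fun c => pvItemsC.any fun kv => kv.1 == c) hany]
      simp [hv]
    · have hnone : pvFirstC (fun k => k == ['.'].intercalate ((parts.map String.toList).drop j)) pvItemsC = none := by
        cases h : pvFirstC (fun k => k == ['.'].intercalate ((parts.map String.toList).drop j)) pvItemsC with
        | none => rfl
        | some v => exact absurd ⟨v, h⟩ hg
      have hany : ¬ (pvItemsC.any (fun kv => kv.1 == ['.'].intercalate ((parts.map String.toList).drop j)) = true) :=
        fun h => hg (pvFirstC_any_beq _ _ h)
      rw [List.find?_cons_of_neg (p := fun c => pvItemsC.any fun kv => kv.1 == c) hany]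
      rw [hnone]
      exact ih parts

theorem pv_split_parts (s : String) :
    (PySem.Str.split? s ".").getD []
      = (List.splitOnP (· == '.') s.toList).map String.ofList := by
  simp only [PySem.Str.split?, PySem.Chars.split?]
  rw [show (("." : String).toList) = ['.'] from rfl]
  simp [pv_splitOn_eq]

-- distinct keys, and no earlier key is a dotted suffix of a later one (the dict-order fact)
set_option maxHeartbeats 2000000 in
theorem pv_items_fact :
    pvItemsC.Pairwise (fun a b => a.1 ≠ b.1 ∧ ¬(('.' :: a.1) <:+ b.1)) := by
  decide

set_option maxHeartbeats 2000000 in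
theorem pv_main (host : String) : host_to_source host = host_to_source_alt host := by
  simp only [host_to_source, host_to_source_alt]
  set s := PySem.Str.lower (if host == "" then "" else host) with hs
  have hps := pv_split_parts s
  set parts := List.splitOnP (· == '.') s.toList with hparts
  have hmapback : ((parts.map String.ofList).map String.toList) = parts := by
    simp [List.map_map, Function.comp_def]
  have hne : parts ≠ [] := List.splitOnP_ne_nil _ _
  have hdf : ∀ p ∈ parts, ('.' : Char) ∉ p := pv_dotfree '.' s.toList
  have hrec : ['.'].intercalate parts = s.toList := pv_recon s.toList
  obtain ⟨p0, ps, hp0⟩ := List.exists_cons_of_ne_nil hne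
  have hcands : pvCands parts = s.toList :: pvCands ps := by
    rw [hp0]
    simp only [pvCands]
    rw [← hrec, hp0]
  rw [hps]
  rw [show ((parts.map String.ofList).length) = parts.length from by simp]
  rw [pv_pyRange_nat, pvBLoop_eq, hmapback, ← pv_cands_eq_map]
  rw [pv_get?_eq_items]
  by_cases hg : ∃ v, pvFirstC (fun k => k == s.toList) pvItemsC = some v
  · obtain ⟨v, hv⟩ := hg
    have hany := pvFirstC_beq_any _ _ _ hv
    rw [hv, hcands, List.find?_cons_of_pos (p := fun c => pvItemsC.any fun kv => kv.1 == c) hany]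
    simp [hv]
  · have hnone : pvFirstC (fun k => k == s.toList) pvItemsC = none := by
      cases h : pvFirstC (fun k => k == s.toList) pvItemsC with
      | none => rfl
      | some v => exact absurd ⟨v, h⟩ hg
    rw [hnone]
    rw [show pvFriendly.items = pvItems from rfl, pvALoop_eq]
    rw [show (List.map (fun kv => (kv.1.toList, kv.2)) pvItems) = pvItemsC from rfl]
    rw [pvFirstC_congr pvItemsC (fun k => decide (s.toList = k ∨ ('.' :: k) <:+ s.toList))
          (fun k => decide (k ∈ pvCands parts))
          (fun kv _ => by exact decide_eq_decide.mpr (hrec ▸ pv_matches_iff parts hne hdf kv.1))]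
    rw [pvG (pvCands parts) pvItemsC pv_items_fact (pv_cands_pairwise parts)]

-- ===== VERDICT (by name: the statement is the Claim_ definition above) =====
theorem host_to_source_spec : Claim_equal_host_to_source := by
  intro host _
  exact pv_main host
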